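-- pv_equiv track=rewrite | github.com/sammwaughh/Project-Eulers | problem-61.py | heptagonals_under_m
-- ===== SOURCE A (Python) =====
-- def heptagonals_under_m(m):
--     i = 1
--     is_heptagonal = [False] * m
--     t = 1
--     while t < m:
--         is_heptagonal[t] = True
--         i += 5
--         t += i
--     return is_heptagonal
-- ===== SOURCE B (Python) =====
-- def heptagonals_under_m(m):
--     # Phase 1: list the heptagonal numbers below m by the closed form.
--     hepts = []
--     n = 1
--     while n * (5 * n - 3) // 2 < m:
--         hepts.append(n * (5 * n - 3) // 2)
--         n += 1
--     # Phase 2: assemble the output as runs of False separated by True marks.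
--     out = []
--     prev = 0
--     for t in hepts:
--         out.extend([False] * (t - prev))
--         out.append(True)
--         prev = t + 1
--     out.extend([False] * (max(m, 0) - prev))
--     return out
-- ===== Notes on version B (the rewrite author's own statement) =====
-- stated objective: alternative
-- what changed: Replaces A's single pass that preallocates a boolean array and mutates it via two additive accumulators with a two-phase algorithm: first generate the list of heptagonal numbers below m from the closed form n*(5n-3)//2, then assemble the output by concatenating runs of False separated by True marks (no preallocation, no index assignment).
import Mathlib
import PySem

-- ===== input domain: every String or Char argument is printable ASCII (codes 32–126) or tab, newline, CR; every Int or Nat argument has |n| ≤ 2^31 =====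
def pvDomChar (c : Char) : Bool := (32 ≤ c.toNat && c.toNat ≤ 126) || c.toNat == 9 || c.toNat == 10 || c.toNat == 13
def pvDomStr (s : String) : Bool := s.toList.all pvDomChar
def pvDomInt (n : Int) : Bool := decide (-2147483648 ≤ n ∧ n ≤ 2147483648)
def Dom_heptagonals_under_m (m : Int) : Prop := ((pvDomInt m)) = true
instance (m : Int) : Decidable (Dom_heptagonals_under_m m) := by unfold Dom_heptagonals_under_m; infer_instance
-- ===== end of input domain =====

-- B replaces A's in-place marking of a preallocated array (two additive accumulators)
-- with a two-phase algorithm: first list the heptagonal numbers below m by the closed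
-- form, then assemble the output as runs of False separated by True (alternative; same cost).

-- ===== PORT A =====
-- A's while loop: state (i, t, is_heptagonal); fuel m.toNat bounds the iteration count
-- (each step increases t by i+5 ≥ 6, and the loop only runs while t < m).
def heptLoopA (fuel : Nat) (m i t : Int) (arr : List Bool) : List Bool :=
  match fuel with
  | 0 => arr
  | fuel + 1 =>
    if t < m then
      heptLoopA fuel m (i + 5) (t + (i + 5)) (PySem.List.pySetD arr t true)
    else arr

def heptagonals_under_m (m : Int) : List Bool :=
  heptLoopA m.toNat m 1 1 (List.replicate m.toNat false)

-- ===== PORT B =====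
-- Phase 1 of Source B: collect the heptagonal numbers below m (fuel m.toNat suffices
-- since the n-th heptagonal number is at least n).
def heptList (fuel : Nat) (m n : Int) : List Int :=
  match fuel with
  | 0 => []
  | fuel + 1 =>
    if PySem.Int.floordiv (n * (5 * n - 3)) 2 < m then
      PySem.Int.floordiv (n * (5 * n - 3)) 2 :: heptList fuel m (n + 1)
    else []

def heptagonals_under_m_alt (m : Int) : List Bool :=
  let hepts := heptList m.toNat m 1
  -- Phase 2 of Source B: the for loop threading (out, prev).
  let st := hepts.foldl
    (fun (st : List Bool × Int) t =>
      (st.1 ++ List.replicate (t - st.2).toNat false ++ [true], t + 1))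
    ([], 0)
  st.1 ++ List.replicate ((max m 0) - st.2).toNat false

-- ===== PRECONDITION & SPEC =====
def Spec_heptagonals_under_m (m : Int) (out : List Bool) : Prop := out = heptagonals_under_m_alt m
instance (m : Int) (out : List Bool) : Decidable (Spec_heptagonals_under_m m out) := by unfold Spec_heptagonals_under_m; infer_instance

-- ===== CLAIM (what is proved, stated in full; the proofs are below) =====
def Claim_equal_heptagonals_under_m : Prop := ∀ (m : Int), Dom_heptagonals_under_m m → Spec_heptagonals_under_m m (heptagonals_under_m m)

-- ===== LEMMAS AND PROOFS =====

-- Recursive description of B's phase-2 fold (including the trailing run of False).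
def buildRuns (m : Int) : List Int → Int → List Bool
  | [], prev => List.replicate ((max m 0) - prev).toNat false
  | t :: rest, prev =>
      List.replicate (t - prev).toNat false ++ true :: buildRuns m rest (t + 1)

-- The fold with accumulator (out, prev) appends buildRuns to out.
theorem foldl_buildRuns (m : Int) (hepts : List Int) (out : List Bool) (prev : Int) :
    (let st := hepts.foldl
      (fun (st : List Bool × Int) t =>
        (st.1 ++ List.replicate (t - st.2).toNat false ++ [true], t + 1)) (out, prev)
     st.1 ++ List.replicate ((max m 0) - st.2).toNat false)
    = out ++ buildRuns m hepts prev := by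
  induction hepts generalizing out prev with
  | nil => simp [buildRuns]
  | cons t rest ih =>
    simp only [List.foldl_cons, buildRuns]
    rw [ih]
    simp

-- The heptagonal closed form is exact (the product is even), stated as a step identity.
theorem hept_step (n t : Int)
    (ht : t = PySem.Int.floordiv (n * (5 * n - 3)) 2) :
    PySem.Int.floordiv ((n + 1) * (5 * (n + 1) - 3)) 2 = t + (5 * n + 1) := by
  have hexp : (n + 1) * (5 * (n + 1) - 3) = n * (5 * n - 3) + 2 * (5 * n + 1) := by ring
  rw [hexp, ht, PySem.Int.floordiv_eq_ediv_of_pos (by omega),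
      PySem.Int.floordiv_eq_ediv_of_pos (by omega)]
  omega

-- Setting index t of pre ++ replicate k false (pre.length ≤ t < pre.length + k)
-- splits the replicate around a true.
theorem pySetD_replicate_split (pre : List Bool) (k : Nat) (t : Int)
    (h1 : (pre.length : Int) ≤ t) (h2 : t < (pre.length : Int) + k) :
    PySem.List.pySetD (pre ++ List.replicate k false) t true
      = (pre ++ List.replicate (t.toNat - pre.length) false ++ [true])
        ++ List.replicate (k - (t.toNat - pre.length) - 1) false := by
  rw [PySem.List.pySetD_of_nonneg _ _ (le_trans (Int.natCast_nonneg _) h1),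
      show [true] = List.replicate 1 true from rfl]
  apply List.ext_getElem
  · simp; omega
  · intro i hi hi'
    simp only [List.getElem_set, List.getElem_append, List.length_append,
      List.length_replicate, List.getElem_replicate]
    split_ifs <;> first | rfl | omega

-- Lockstep between A's marking loop and B's run construction: if pre is the part of
-- the array already agreed on (prev = pre.length), A's remaining loop fills exactly
-- buildRuns over the remaining heptagonal numbers.
theorem loop_eq_buildRuns (fuel : Nat) (m n t : Int) (pre : List Bool)
    (hn : 1 ≤ n)
    (ht : t = PySem.Int.floordiv (n * (5 * n - 3)) 2)
    (hpt : (pre.length : Int) ≤ t)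
    (hpm : pre.length ≤ m.toNat) :
    heptLoopA fuel m (5 * n - 4) t
        (pre ++ List.replicate (m.toNat - pre.length) false)
      = pre ++ buildRuns m (heptList fuel m n) (pre.length : Int) := by
  induction fuel generalizing n t pre with
  | zero =>
    simp only [heptLoopA, heptList, buildRuns]
    have : (m.toNat - pre.length) = ((max m 0) - (pre.length : Int)).toNat := by omega
    rw [this]
  | succ fuel ih =>
    simp only [heptLoopA, heptList]
    rw [← ht]
    split
    · rename_i hlt
      have hm0 : 0 < m := by omega
      have htm : t.toNat < m.toNat := by omega
      rw [pySetD_replicate_split pre (m.toNat - pre.length) t hpt (by omega)]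
      have hstep : PySem.Int.floordiv ((n + 1) * (5 * (n + 1) - 3)) 2 = t + (5 * n + 1) :=
        hept_step n t ht
      set pre' := pre ++ List.replicate (t.toNat - pre.length) false ++ [true] with hpre'
      have hlen : pre'.length = t.toNat + 1 := by simp [hpre']; omega
      have harr : (m.toNat - pre.length - (t.toNat - pre.length) - 1)
          = m.toNat - pre'.length := by rw [hlen]; omega
      rw [harr]
      have := ih (n + 1) (t + (5 * n + 1)) pre'
        (by omega) (by rw [hstep])
        (by rw [hlen]; omega)
        (by rw [hlen]; omega)
      rw [show (5 * n - 4 + 5 : Int) = 5 * (n + 1) - 4 from by ring,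
          show t + (5 * (n + 1) - 4) = t + (5 * n + 1) from by ring, this]
      simp only [buildRuns, hpre', List.append_assoc, List.cons_append, List.nil_append]
      have e1 : (t.toNat - pre.length) = (t - (pre.length : Int)).toNat := by omega
      rw [e1]
      have e2 : (((pre ++ (List.replicate (t - (pre.length : Int)).toNat false ++ [true])).length : Nat) : Int) = t + 1 := by
        simp; omega
      rw [e2]
    · simp only [buildRuns]
      have : (m.toNat - pre.length) = ((max m 0) - (pre.length : Int)).toNat := by omega
      rw [this]

-- ===== VERDICT (by name: the statement is the Claim_ definition above) =====
theorem heptagonals_under_m_spec : Claim_equal_heptagonals_under_m := by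
  intro m _
  unfold Spec_heptagonals_under_m heptagonals_under_m heptagonals_under_m_alt
  rw [foldl_buildRuns]
  have := loop_eq_buildRuns m.toNat m 1 1 [] (by omega) (by decide) (by simp) (by simp)
  simpa using this
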